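-- pv_equiv track=rewrite | github.com/amanalehegne/A2SV_PROGRAMMING | Contests/patter.py | findPatter
-- ===== SOURCE A (Python) =====
-- def findPatter(arr):
--     size = len(arr[0])
--     answer = ["?"] * size
--     for pattern in arr:
--         for i, char in enumerate(pattern):
--             if answer[i] == "?":
--                 answer[i] = char
--             elif char == "?":
--                 continue
--             else:
--                 if answer[i] != char:
--                     answer[i] = "remove"
--     for i in range(len(answer)):
--         if answer[i] == "?":
--             answer[i] = "c"
--         elif answer[i] == "remove":
--             answer[i] = "?"
--     return "".join(answer)
-- ===== SOURCE B (Python) =====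
-- def findPatter(arr):
--     size = len(arr[0])
--     out = []
--     for i in range(size):
--         chars = {p[i] for p in arr if i < len(p) and p[i] != '?'}
--         if not chars:
--             out.append('c')
--         elif len(chars) == 1:
--             out.append(chars.pop())
--         else:
--             out.append('?')
--     return ''.join(out)
-- ===== Notes on version B (the rewrite author's own statement) =====
-- stated objective: simpler
-- what changed: B builds the answer column by column from the set of distinct non-'?' characters at each position, replacing A's mutable sentinel-state array ('remove') and its second remapping pass.
import Mathlib
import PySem

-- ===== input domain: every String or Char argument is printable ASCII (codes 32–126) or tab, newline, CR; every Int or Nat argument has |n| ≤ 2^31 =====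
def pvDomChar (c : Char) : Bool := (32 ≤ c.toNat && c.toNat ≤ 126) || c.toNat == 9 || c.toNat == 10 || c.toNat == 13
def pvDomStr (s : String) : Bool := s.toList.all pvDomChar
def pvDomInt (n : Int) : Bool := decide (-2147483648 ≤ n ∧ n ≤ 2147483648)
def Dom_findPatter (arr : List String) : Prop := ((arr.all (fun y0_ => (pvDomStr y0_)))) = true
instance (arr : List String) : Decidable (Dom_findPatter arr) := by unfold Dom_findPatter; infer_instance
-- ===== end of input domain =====

-- B replaces A's mutable sentinel-state answer array with a per-column set of distinct non-'?' characters; simpler, no mutation either way.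

-- ===== PORT A =====
-- body of the inner loop: answer[i] read, branch, answer[i] write
def pvUpd (ans : List String) (ic : Int × Char) : List String :=
  let cur := PySem.List.pyGetD ans ic.1 "?"   -- answer[i]; IndexError excluded by Pre_
  if cur = "?" then PySem.List.pySetD ans ic.1 (String.ofList [ic.2])
  else if ic.2 = '?' then ans
  else if cur ≠ String.ofList [ic.2] then PySem.List.pySetD ans ic.1 "remove"
  else ans

-- for i, char in enumerate(pattern): …
def pvInner (answer : List String) (pattern : String) : List String :=
  (PySem.List.enumerate pattern.toList 0).foldl pvUpd answer

def findPatter (arr : List String) : String :=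
  let size := (PySem.List.pyGetD arr 0 "").toList.length   -- arr[0]; IndexError on [] excluded by Pre_
  let answer := List.replicate size "?"
  let answer := arr.foldl pvInner answer
  let answer := answer.map (fun s => if s = "?" then "c" else if s = "remove" then "?" else s)
  PySem.Str.join "" answer

-- ===== PORT B =====
def findPatter_alt (arr : List String) : String :=
  let size := (PySem.List.pyGetD arr 0 "").toList.length
  let out := (List.range size).map (fun i =>
    let chars : PySem.Set Char := PySem.Set.ofList
      ((arr.filter (fun p => decide (i < p.toList.length) && decide (p.toList.getD i '?' ≠ '?'))).map
        (fun p => p.toList.getD i '?'))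
    match chars with
    | [] => 'c'
    | [c] => c
    | _ => '?')
  String.ofList out

-- ===== PRECONDITION & SPEC =====
-- Pre_ excludes exactly the inputs where A raises IndexError: the empty list (arr[0]) and
-- lists containing a pattern longer than arr[0] (answer[i] out of range).
def Pre_findPatter (arr : List String) : Prop :=
  arr ≠ [] ∧ ∀ p ∈ arr, p.toList.length ≤ (arr.headD "").toList.length
instance (arr : List String) : Decidable (Pre_findPatter arr) := by unfold Pre_findPatter; infer_instance
def pvWitness_findPatter : List String := ["ab?", "a?b", "acb"]

def Spec_findPatter (arr : List String) (out : String) : Prop := out = findPatter_alt arr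
instance (arr : List String) (out : String) : Decidable (Spec_findPatter arr out) := by unfold Spec_findPatter; infer_instance

-- ===== CLAIM =====
def Claim_equal_findPatter : Prop := ∀ (arr : List String), Dom_findPatter arr → Pre_findPatter arr → Spec_findPatter arr (findPatter arr)
-- ===== LEMMAS AND PROOFS =====

-- the scalar state machine A runs at one column
def pvStep1 (st : String) (c : Char) : String :=
  if st = "?" then String.ofList [c]
  else if c = '?' then st
  else if st ≠ String.ofList [c] then "remove" else st

-- B's verdict character for a column, as a function of the set of distinct non-'?' chars
def pvVerdict (S : List Char) : Char :=
  match S with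
  | [] => 'c'
  | [c] => c
  | _ => '?'

-- A's column state as a function of the set of distinct non-'?' chars seen so far
def pvStateOf (S : List Char) : String :=
  match S with
  | [] => "?"
  | [c] => String.ofList [c]
  | _ => "remove"

-- the chars contributed to column j (shorter patterns contribute nothing)
def pvCol (arr : List String) (j : Nat) : List Char :=
  arr.filterMap (fun p => if j < p.toList.length then some (p.toList.getD j '?') else none)

theorem pv_set_getD_self (l : List String) (k : Nat) : l.set k (l.getD k "?") = l := by
  induction l generalizing k with
  | nil => rfl
  | cons a t ih => cases k with
    | zero => simp [List.getD]
    | succ k => simp [List.getD] at ih ⊢; exact ih k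

theorem pvUpd_eq (ans : List String) (k : Nat) (c : Char) :
    pvUpd ans ((k : Int), c) = ans.set k (pvStep1 (ans.getD k "?") c) := by
  unfold pvUpd pvStep1
  simp only [PySem.List.pyGetD_natCast, PySem.List.pySetD_natCast]
  split_ifs with h1 h2 h3 <;> try rfl
  · exact (pv_set_getD_self ans k).symm
  · exact (pv_set_getD_self ans k).symm

theorem pvInnerAux_length (cs : List Char) (k : Nat) (ans : List String) :
    ((PySem.List.enumerate cs (k : Int)).foldl pvUpd ans).length = ans.length := by
  induction cs generalizing k ans with
  | nil => rfl
  | cons c cs ih =>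
      rw [PySem.List.enumerate_cons]
      simp only [List.foldl_cons]
      have : ((k : Int) + 1) = ((k + 1 : Nat) : Int) := by push_cast; ring
      rw [this, ih, pvUpd_eq, List.length_set]

theorem pvInnerAux (cs : List Char) (k : Nat) (ans : List String) (j : Nat)
    (hj : j < ans.length) :
    ((PySem.List.enumerate cs (k : Int)).foldl pvUpd ans).getD j "?" =
      if k ≤ j ∧ j < k + cs.length then pvStep1 (ans.getD j "?") (cs.getD (j - k) '?')
      else ans.getD j "?" := by
  induction cs generalizing k ans with
  | nil =>
      have : ¬ (k ≤ j ∧ j < k + 0) := by omega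
      simp [PySem.List.enumerate]
  | cons c cs ih =>
      rw [PySem.List.enumerate_cons]
      simp only [List.foldl_cons]
      have hcast : ((k : Int) + 1) = ((k + 1 : Nat) : Int) := by push_cast; ring
      rw [hcast, pvUpd_eq]
      have hj' : j < (ans.set k (pvStep1 (ans.getD k "?") c)).length := by
        rw [List.length_set]; exact hj
      rw [ih (k + 1) _ hj']
      have hset : ∀ (i : Nat), i < ans.length →
          (ans.set k (pvStep1 (ans.getD k "?") c)).getD i "?" =
            if i = k then pvStep1 (ans.getD k "?") c else ans.getD i "?" := by
        intro i hi
        rw [List.getD_eq_getElem?_getD, List.getElem?_set]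
        by_cases hik : k = i
        · subst hik; simp [hi, List.getD_eq_getElem?_getD]
        · simp [hik, Ne.symm hik, List.getD_eq_getElem?_getD]
      by_cases h1 : k + 1 ≤ j ∧ j < k + 1 + cs.length
      · have hne : ¬ (j = k) := by omega
        have h2 : k ≤ j ∧ j < k + (c :: cs).length := by simp; omega
        rw [if_pos h1, if_pos h2, hset j hj, if_neg hne]
        have : (c :: cs).getD (j - k) '?' = cs.getD (j - (k + 1)) '?' := by
          have : j - k = (j - (k + 1)) + 1 := by omega
          rw [this]; rfl
        rw [this]
      · rw [if_neg h1, hset j hj]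
        by_cases hjk : j = k
        · rw [if_pos hjk]
          have h2 : k ≤ j ∧ j < k + (c :: cs).length := by
            simp only [List.length_cons]; omega
          rw [if_pos h2, hjk]
          simp
        · rw [if_neg hjk]
          have h2 : ¬ (k ≤ j ∧ j < k + (c :: cs).length) := by
            simp only [List.length_cons]; omega
          rw [if_neg h2]

theorem pvInner_length (answer : List String) (p : String) :
    (pvInner answer p).length = answer.length := by
  unfold pvInner
  have := pvInnerAux_length p.toList 0 answer
  simpa using this

theorem pvInner_getD (p : String) (answer : List String) (j : Nat)
    (hj : j < answer.length) :
    (pvInner answer p).getD j "?" =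
      if j < p.toList.length then pvStep1 (answer.getD j "?") (p.toList.getD j '?')
      else answer.getD j "?" := by
  unfold pvInner
  have := pvInnerAux p.toList 0 answer j hj
  simpa using this

theorem pvOuter_length (arr : List String) (ans : List String) :
    (arr.foldl pvInner ans).length = ans.length := by
  induction arr generalizing ans with
  | nil => rfl
  | cons p t ih => simp only [List.foldl_cons]; rw [ih, pvInner_length]

theorem pvOuter (arr : List String) (ans : List String) (j : Nat) (hj : j < ans.length) :
    (arr.foldl pvInner ans).getD j "?" =
      arr.foldl (fun st p => if j < p.toList.length then pvStep1 st (p.toList.getD j '?') else st)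
        (ans.getD j "?") := by
  induction arr generalizing ans with
  | nil => rfl
  | cons p t ih =>
      simp only [List.foldl_cons]
      have hj' : j < (pvInner ans p).length := by rw [pvInner_length]; exact hj
      rw [ih (pvInner ans p) hj', pvInner_getD p ans j hj]

theorem pvColFold (arr : List String) (j : Nat) (st0 : String) :
    arr.foldl (fun st p => if j < p.toList.length then pvStep1 st (p.toList.getD j '?') else st) st0 =
      (pvCol arr j).foldl pvStep1 st0 := by
  induction arr generalizing st0 with
  | nil => rfl
  | cons p t ih =>
      by_cases h : j < p.toList.length
      · simp only [List.foldl_cons, pvCol, List.filterMap_cons, if_pos h]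
        exact ih _
      · simp only [List.foldl_cons, pvCol, List.filterMap_cons, if_neg h]
        exact ih _

theorem pvColList (arr : List String) (j : Nat) :
    ((arr.filter (fun p => decide (j < p.toList.length) && decide (p.toList.getD j '?' ≠ '?'))).map
        (fun p => p.toList.getD j '?')) = (pvCol arr j).filter (· ≠ '?') := by
  induction arr with
  | nil => rfl
  | cons p t ih =>
      simp only [pvCol, List.filterMap_cons]
      by_cases h : j < p.toList.length
      · have h' : j < p.length := by simpa using h
        rw [if_pos h]
        simp [pvCol, List.filter_cons, List.getD_eq_getElem?_getD,
          List.getElem?_eq_getElem h'] at ih ⊢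
        split_ifs <;> simp_all <;> rfl
      · have h' : ¬ j < p.length := by simpa using h
        rw [if_neg h]
        simp [h', pvCol, List.getD_eq_getElem?_getD] at ih ⊢
        exact ih

theorem pv_ofList_singleton_ne (a b : Char) (h : a ≠ b) :
    String.ofList [a] ≠ String.ofList [b] := by
  simp [String.ofList_inj, h]

theorem pv_remove_ne (c : Char) : ("remove" : String) ≠ String.ofList [c] := by
  intro h
  have : ("remove" : String).toList = [c] := by rw [h]; simp
  simp at this

theorem pv_core (L : List Char) (S : List Char) (hS : ∀ x ∈ S, x ≠ '?') :
    L.foldl pvStep1 (pvStateOf S) = pvStateOf ((L.filter (· ≠ '?')).foldl PySem.Set.add S) := by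
  induction L generalizing S with
  | nil => rfl
  | cons c L ih =>
      rw [List.foldl_cons, List.filter_cons]
      by_cases hc : c = '?'
      · have hstep : pvStep1 (pvStateOf S) '?' = pvStateOf S := by
          match S with
          | [] => rfl
          | [s] =>
              have hs : s ≠ '?' := hS s (by simp)
              have h1 : String.ofList [s] ≠ ("?" : String) := by
                have h0 : ("?" : String) = String.ofList ['?'] := rfl
                rw [h0]; exact pv_ofList_singleton_ne s '?' hs
              unfold pvStep1 pvStateOf
              simp [h1]
          | a :: b :: t =>
              unfold pvStep1 pvStateOf
              simp
        subst hc
        rw [if_neg (by simp), hstep]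
        exact ih S hS
      · have hstep : pvStep1 (pvStateOf S) c = pvStateOf (PySem.Set.add S c) := by
          match S with
          | [] =>
              unfold pvStep1 pvStateOf PySem.Set.add PySem.Set.contains
              simp
          | [s] =>
              have hs : s ≠ '?' := hS s (by simp)
              have h1 : String.ofList [s] ≠ ("?" : String) := by
                have h0 : ("?" : String) = String.ofList ['?'] := rfl
                rw [h0]; exact pv_ofList_singleton_ne s '?' hs
              by_cases hsc : s = c
              · subst hsc
                unfold pvStep1 pvStateOf PySem.Set.add PySem.Set.contains
                simp [h1, hc]
              · have hne : String.ofList [s] ≠ String.ofList [c] :=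
                  pv_ofList_singleton_ne s c hsc
                unfold pvStep1 pvStateOf PySem.Set.add PySem.Set.contains
                simp [h1, hc, hne, Ne.symm hsc]
          | a :: b :: t =>
              have h2 : pvStateOf (a :: b :: t) = "remove" := rfl
              have h3 : pvStep1 "remove" c = "remove" := by
                unfold pvStep1
                simp [hc, pv_remove_ne c]
              have h4 : pvStateOf (PySem.Set.add (a :: b :: t) c) = "remove" := by
                unfold PySem.Set.add
                split_ifs with h
                · rfl
                · rfl
              rw [h2, h3, h4]
        have hS' : ∀ x ∈ PySem.Set.add S c, x ≠ '?' := by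
          intro x hx
          rcases (PySem.Set.mem_add S c x).mp hx with h | h
          · exact hS x h
          · subst h; exact hc
        rw [if_pos (by simp [hc]), List.foldl_cons, hstep]
        exact ih (PySem.Set.add S c) hS'

theorem pv_final_char (S : List Char) (hS : ∀ x ∈ S, x ≠ '?') :
    (if pvStateOf S = "?" then "c" else if pvStateOf S = "remove" then "?" else pvStateOf S) =
      String.ofList [pvVerdict S] := by
  match S with
  | [] => rfl
  | [s] =>
      have hs : s ≠ '?' := hS s (by simp)
      have h1 : String.ofList [s] ≠ ("?" : String) := by
        have h0 : ("?" : String) = String.ofList ['?'] := rfl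
        rw [h0]; exact pv_ofList_singleton_ne s '?' hs
      have h2 : String.ofList [s] ≠ ("remove" : String) := fun h => pv_remove_ne s h.symm
      unfold pvStateOf pvVerdict
      simp [h1, h2]
  | a :: b :: t => rfl

theorem pv_join_singletons (cs : List Char) :
    PySem.Str.join "" (cs.map (fun c => String.ofList [c])) = String.ofList cs := by
  unfold PySem.Str.join
  congr 1
  have h1 : (List.map String.toList (cs.map (fun c => String.ofList [c]))) =
      cs.map (fun c => [c]) := by
    simp
  rw [h1]
  have h2 : ("" : String).toList = [] := rfl
  rw [h2, PySem.Chars.join_nil_singletons]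

-- ===== VERDICT =====
theorem findPatter_spec : Claim_equal_findPatter := by
  unfold Claim_equal_findPatter
  intro arr _ hpre
  unfold Spec_findPatter
  obtain ⟨hne, hall⟩ := hpre
  simp only [findPatter, findPatter_alt]
  set size := (PySem.List.pyGetD arr 0 "").toList.length with hsize
  have hsz : ∀ p ∈ arr, p.toList.length ≤ size := by
    intro p hp
    have := hall p hp
    cases arr with
    | nil => exact absurd rfl hne
    | cons a t =>
        simpa [hsize, PySem.List.pyGetD_zero_cons] using this
  have hmain : (arr.foldl pvInner (List.replicate size "?")).map
        (fun s => if s = "?" then "c" else if s = "remove" then "?" else s) =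
      (List.range size).map (fun i => String.ofList
        [pvVerdict (PySem.Set.ofList ((arr.filter (fun p => decide (i < p.toList.length) &&
              decide (p.toList.getD i '?' ≠ '?'))).map (fun p => p.toList.getD i '?')))]) := by
    apply List.ext_getElem
    · simp [pvOuter_length]
    · intro j hj1 hj2
      have hjs : j < size := by simpa [pvOuter_length] using hj1
      have hrepl : j < (List.replicate size ("?" : String)).length := by simpa using hjs
      have hflen : j < (arr.foldl pvInner (List.replicate size ("?" : String))).length := by
        rw [pvOuter_length]; simpa using hjs
      rw [List.getElem_map, List.getElem_map, List.getElem_range]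
      have hgetD : (arr.foldl pvInner (List.replicate size ("?" : String)))[j] =
          (arr.foldl pvInner (List.replicate size ("?" : String))).getD j "?" := by
        rw [List.getD_eq_getElem?_getD, List.getElem?_eq_getElem hflen]; rfl
      rw [hgetD, pvOuter arr _ j hrepl]
      have hrep : (List.replicate size ("?" : String)).getD j "?" = "?" := by
        rw [List.getD_eq_getElem?_getD, List.getElem?_eq_getElem hrepl]
        simp
      rw [hrep, pvColFold]
      have hS0 : ∀ x ∈ ([] : List Char), x ≠ '?' := by simp
      have hcore : (pvCol arr j).foldl pvStep1 "?" =
          pvStateOf (((pvCol arr j).filter (· ≠ '?')).foldl PySem.Set.add []) :=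
        pv_core (pvCol arr j) [] hS0
      rw [hcore]
      have hofl : ((pvCol arr j).filter (· ≠ '?')).foldl PySem.Set.add [] =
          PySem.Set.ofList ((pvCol arr j).filter (· ≠ '?')) := rfl
      rw [hofl]
      have hSne : ∀ x ∈ PySem.Set.ofList ((pvCol arr j).filter (· ≠ '?')), x ≠ '?' := by
        intro x hx
        have := (PySem.Set.mem_ofList _ x).mp hx
        simp at this
        exact this.2
      rw [pv_final_char _ hSne, pvColList]
  rw [hmain]
  rw [show ((List.range size).map (fun i => String.ofList
        [pvVerdict (PySem.Set.ofList ((arr.filter (fun p => decide (i < p.toList.length) &&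
              decide (p.toList.getD i '?' ≠ '?'))).map (fun p => p.toList.getD i '?')))])) =
      ((List.range size).map (fun i =>
        pvVerdict (PySem.Set.ofList ((arr.filter (fun p => decide (i < p.toList.length) &&
              decide (p.toList.getD i '?' ≠ '?'))).map (fun p => p.toList.getD i '?'))))).map
        (fun c => String.ofList [c]) from by rw [List.map_map]; rfl]
  rw [pv_join_singletons]
  rfl
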